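-- pv_equiv track=rewrite | github.com/Richard5P/market_research | Historical/rpt_calc_vs.py | calc_stat_sum
-- ===== SOURCE A (Python) =====
-- def calc_stat_sum(reg_stat_data):
--     """
--     Sum values for each region, stat_type
--     """
--     stats_sum = {}
--     for line in reg_stat_data:
--         if line[0] in stats_sum.keys():
--             if line[1] in stats_sum[line[0]].keys():
--                 stats_sum[line[0]][line[1]] += line[2]
--             else:
--                 stats_sum[line[0]][line[1]] = line[2]
--         else:
--             stats_sum[line[0]] = {line[1]: line[2]}
--     return (stats_sum)
-- ===== SOURCE B (Python) =====
-- def calc_stat_sum(reg_stat_data):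
--     """
--     Sum values for each region, stat_type
--     (two passes: flat dict keyed by (region, stat), then reshape to nested)
--     """
--     flat = {}
--     for line in reg_stat_data:
--         key = (line[0], line[1])
--         if key in flat:
--             flat[key] += line[2]
--         else:
--             flat[key] = line[2]
--     stats_sum = {}
--     for (region, stat), total in flat.items():
--         if region not in stats_sum:
--             stats_sum[region] = {}
--         stats_sum[region][stat] = total
--     return stats_sum
-- ===== Notes on version B (the rewrite author's own statement) =====
-- stated objective: alternative
-- what changed: Replaces the single pass with nested membership tests on a dict-of-dicts by two flat passes: first accumulate sums in one dict keyed by the (region, stat) tuple, then reshape that flat dict into the nested result.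
import Mathlib
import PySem

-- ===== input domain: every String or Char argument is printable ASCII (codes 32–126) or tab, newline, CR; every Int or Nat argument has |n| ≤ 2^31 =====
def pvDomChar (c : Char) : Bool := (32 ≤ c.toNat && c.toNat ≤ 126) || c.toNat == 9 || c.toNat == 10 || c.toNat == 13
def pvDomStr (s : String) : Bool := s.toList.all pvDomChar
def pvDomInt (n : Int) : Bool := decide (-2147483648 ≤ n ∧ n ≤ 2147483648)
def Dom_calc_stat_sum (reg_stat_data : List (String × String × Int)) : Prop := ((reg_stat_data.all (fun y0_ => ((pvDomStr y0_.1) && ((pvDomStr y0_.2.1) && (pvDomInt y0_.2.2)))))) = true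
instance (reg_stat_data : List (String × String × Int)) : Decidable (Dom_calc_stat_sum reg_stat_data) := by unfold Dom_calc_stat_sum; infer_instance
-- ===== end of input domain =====

-- B replaces A's single pass over a dict-of-dicts (nested membership tests) by two flat
-- passes: accumulate sums in one dict keyed by the (region, stat) pair, then reshape it
-- into the nested result (objective: alternative decomposition, same cost).

-- ===== PORT A =====
-- loop body of A: nested dict, membership tests region-then-stat
def calc_stat_sum_step (st : PySem.Dict String (PySem.Dict String Int))
    (line : String × String × Int) : PySem.Dict String (PySem.Dict String Int) :=
  if st.contains line.1 then
    let inner := st.getD line.1 PySem.Dict.empty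
    if inner.contains line.2.1 then
      st.insert line.1 (inner.insert line.2.1 (inner.getD line.2.1 0 + line.2.2))
    else
      st.insert line.1 (inner.insert line.2.1 line.2.2)
  else
    st.insert line.1 (PySem.Dict.ofList [(line.2.1, line.2.2)])

def calc_stat_sum (reg_stat_data : List (String × String × Int)) : List (String × List (String × Int)) :=
  ((reg_stat_data.foldl calc_stat_sum_step PySem.Dict.empty).items).map (fun q => (q.1, q.2.items))

-- ===== PORT B =====
-- first pass of B: one flat dict keyed by the (region, stat) tuple
def css_flat_step (d : PySem.Dict (String × String) Int)
    (line : String × String × Int) : PySem.Dict (String × String) Int :=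
  let key := (line.1, line.2.1)
  if d.contains key then d.insert key (d.getD key 0 + line.2.2)
  else d.insert key line.2.2

-- second pass of B: reshape one flat item into the nested dict
def css_nest_step (st : PySem.Dict String (PySem.Dict String Int))
    (p : (String × String) × Int) : PySem.Dict String (PySem.Dict String Int) :=
  let st1 := if st.contains p.1.1 then st else st.insert p.1.1 PySem.Dict.empty
  st1.insert p.1.1 ((st1.getD p.1.1 PySem.Dict.empty).insert p.1.2 p.2)

def calc_stat_sum_alt (reg_stat_data : List (String × String × Int)) : List (String × List (String × Int)) :=
  let flat := reg_stat_data.foldl css_flat_step PySem.Dict.empty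
  ((flat.items.foldl css_nest_step PySem.Dict.empty).items).map (fun q => (q.1, q.2.items))

-- ===== PRECONDITION & SPEC =====
def Spec_calc_stat_sum (reg_stat_data : List (String × String × Int)) (out : List (String × List (String × Int))) : Prop := out = calc_stat_sum_alt reg_stat_data
instance (reg_stat_data : List (String × String × Int)) (out : List (String × List (String × Int))) : Decidable (Spec_calc_stat_sum reg_stat_data out) := by unfold Spec_calc_stat_sum; infer_instance

-- ===== CLAIM (what is proved, stated in full; the proofs are below) =====
def Claim_equal_calc_stat_sum : Prop := ∀ (reg_stat_data : List (String × String × Int)), Dom_calc_stat_sum reg_stat_data → Spec_calc_stat_sum reg_stat_data (calc_stat_sum reg_stat_data)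

-- ===== LEMMAS AND PROOFS =====

-- the second pass of B as a function of the flat items list
def nestOf (L : List ((String × String) × Int)) : PySem.Dict String (PySem.Dict String Int) :=
  L.foldl css_nest_step PySem.Dict.empty

-- closed form of the nested dict produced from a flat items list with distinct keys
def charD (L : List ((String × String) × Int)) : PySem.Dict String (PySem.Dict String Int) :=
  PySem.Dict.mk ((PySem.Set.ofList (L.map (fun p => p.1.1))).map
    (fun r => (r, PySem.Dict.mk ((L.filter (fun p => p.1.1 == r)).map (fun p => (p.1.2, p.2))))))

theorem charD_keys (L : List ((String × String) × Int)) :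
    (charD L).keys = PySem.Set.ofList (L.map (fun p => p.1.1)) := by
  simp [charD, PySem.Dict.keys, List.map_map, Function.comp_def]

theorem charD_contains (L : List ((String × String) × Int)) (r : String) :
    (charD L).contains r = decide (r ∈ L.map (fun p => p.1.1)) := by
  by_cases hr : r ∈ L.map (fun p => p.1.1)
  · simp only [hr, decide_true]
    rw [charD, PySem.Dict.contains_mk, List.any_map, List.any_eq_true]
    exact ⟨r, (PySem.Set.mem_ofList _ _).mpr hr, by simp⟩
  · simp only [hr, decide_false]
    rw [charD, PySem.Dict.contains_mk, List.any_map, List.any_eq_false]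
    intro r' hr'
    simp only [Function.comp_def, beq_iff_eq]
    rintro rfl
    exact hr ((PySem.Set.mem_ofList _ _).mp hr')

theorem charD_getD (L : List ((String × String) × Int)) (r : String)
    (hr : r ∈ L.map (fun p => p.1.1)) :
    (charD L).getD r PySem.Dict.empty
      = PySem.Dict.mk ((L.filter (fun p => p.1.1 == r)).map (fun p => (p.1.2, p.2))) := by
  apply PySem.Dict.getD_of_mem_items
  · simp only [charD]
    exact List.mem_map_of_mem ((PySem.Set.mem_ofList _ _).mpr hr)
  · rw [charD_keys]; exact PySem.Set.nodup_ofList _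

theorem inner_keys_nodup (L : List ((String × String) × Int))
    (h : (L.map (fun p => p.1)).Nodup) (r : String) :
    (((L.filter (fun p => p.1.1 == r)).map (fun p => (p.1.2, p.2))).map (fun q => q.1)).Nodup := by
  rw [List.map_map]
  simp only [Function.comp_def]
  have hfil : ((L.filter (fun p => p.1.1 == r)).map (fun p => p.1)).Nodup :=
    h.sublist (List.filter_sublist.map _)
  have key : (L.filter (fun p => p.1.1 == r)).map (fun p => p.1.2)
      = ((L.filter (fun p => p.1.1 == r)).map (fun p => p.1)).map (fun q => q.2) := by
    simp [List.map_map]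
  rw [key]
  refine hfil.map_on ?_
  intro a ha b hb hab
  simp only [List.mem_map, List.mem_filter, beq_iff_eq] at ha hb
  obtain ⟨pa, ⟨_, ha2⟩, rfl⟩ := ha
  obtain ⟨pb, ⟨_, hb2⟩, rfl⟩ := hb
  exact Prod.ext (ha2.trans hb2.symm) hab

theorem inner_contains (L : List ((String × String) × Int)) (r s : String) :
    (PySem.Dict.mk ((L.filter (fun p => p.1.1 == r)).map (fun p => (p.1.2, p.2)))).contains s
      = decide ((r, s) ∈ L.map (fun p => p.1)) := by
  by_cases hm : (r, s) ∈ L.map (fun p => p.1)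
  · simp only [hm, decide_true]
    simp only [List.mem_map] at hm
    obtain ⟨p, hp, hp1⟩ := hm
    rw [PySem.Dict.contains_mk, List.any_map, List.any_eq_true]
    refine ⟨p, List.mem_filter.mpr ⟨hp, by simp [hp1]⟩, by simp [hp1]⟩
  · simp only [hm, decide_false]
    rw [PySem.Dict.contains_mk, List.any_map, List.any_eq_false]
    intro p hp
    simp only [List.mem_filter, beq_iff_eq] at hp
    simp only [Function.comp_def, beq_iff_eq]
    intro h2
    exact hm (List.mem_map.mpr ⟨p, hp.1, Prod.ext hp.2 h2⟩)

theorem charD_char (L : List ((String × String) × Int)) (h : (L.map (fun p => p.1)).Nodup) :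
    nestOf L = charD L := by
  induction L using List.reverseRecOn with
  | nil => rfl
  | append_singleton L p ih =>
    rw [List.map_append, List.nodup_append] at h
    obtain ⟨h1, _, h3⟩ := h
    have hnk : p.1 ∉ L.map (fun p => p.1) := fun hm => h3 p.1 hm p.1 (by simp) rfl
    obtain ⟨⟨r, s⟩, v⟩ := p
    unfold nestOf
    rw [List.foldl_append]
    simp only [List.foldl_cons, List.foldl_nil]
    rw [show List.foldl css_nest_step PySem.Dict.empty L = nestOf L from rfl, ih h1]
    unfold css_nest_step
    by_cases hr : r ∈ L.map (fun p => p.1.1)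
    · rw [show ((r, s), v).1.1 = r from rfl, charD_contains]
      simp only [hr, decide_true, if_true]
      rw [charD_getD L r hr]
      apply PySem.Dict.ext
      rw [PySem.Dict.items_insert_of_contains _ _ (by rw [charD_contains]; simpa using hr)]
      have hcs : (PySem.Dict.mk ((L.filter (fun p => p.1.1 == r)).map (fun p => (p.1.2, p.2)))).contains s = false := by
        rw [inner_contains]; simpa using hnk
      simp only [charD, List.map_append, List.map_cons, List.map_nil,
        PySem.Set.ofList_append_singleton,
        PySem.Set.add_of_mem ((PySem.Set.mem_ofList _ _).mpr hr), List.map_map]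
      apply List.map_congr_left
      intro r' hr'
      by_cases hrr : r' = r
      · subst hrr
        simp only [Function.comp_def, beq_self_eq_true, if_true]
        refine congrArg (fun d => (r', d)) (PySem.Dict.ext ?_)
        rw [PySem.Dict.items_insert_of_not_contains _ _ hcs]
        simp [List.filter_append]
      · simp only [Function.comp_def, beq_iff_eq, hrr, if_false]
        have : (L ++ [((r, s), v)]).filter (fun p => p.1.1 == r')
            = L.filter (fun p => p.1.1 == r') := by
          have hne2 : (r == r') = false := beq_eq_false_iff_ne.mpr (fun he => hrr he.symm)
          simp [List.filter_append, hne2]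
        rw [this]
    · rw [show ((r, s), v).1.1 = r from rfl, charD_contains]
      simp only [hr, decide_false, Bool.false_eq_true, if_false]
      rw [PySem.Dict.getD_insert_self, PySem.Dict.insert_insert_self]
      apply PySem.Dict.ext
      rw [PySem.Dict.items_insert_of_not_contains _ _ (by rw [charD_contains]; simpa using hr)]
      have hrR : r ∉ PySem.Set.ofList (L.map (fun p => p.1.1)) :=
        fun hm => hr ((PySem.Set.mem_ofList _ _).mp hm)
      have hfil : L.filter (fun p => p.1.1 == r) = [] := by
        rw [List.filter_eq_nil_iff]
        intro q hq
        simp only [beq_iff_eq]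
        exact fun he => hr (List.mem_map.mpr ⟨q, hq, he⟩)
      simp only [charD, List.map_append, List.map_cons, List.map_nil,
        PySem.Set.ofList_append_singleton, PySem.Set.add_of_not_mem hrR, List.map_append]
      congr 1
      · apply List.map_congr_left
        intro r' hr'
        have hne : ¬ ((r : String) = r') := by
          rintro rfl
          exact hrR hr'
        have : (L ++ [((r, s), v)]).filter (fun p => p.1.1 == r')
            = L.filter (fun p => p.1.1 == r') := by
          simp [List.filter_append, hne]
        rw [this]
      · simp only [List.filter_append, hfil, List.nil_append, List.filter_cons,
          List.filter_nil, beq_self_eq_true, if_true, List.map_cons, List.map_nil]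
        rfl

theorem comm_step (d : PySem.Dict (String × String) Int) (hd : d.keys.Nodup)
    (x : String × String × Int) :
    nestOf (css_flat_step d x).items = calc_stat_sum_step (nestOf d.items) x := by
  have hdL : ((d.items.map (fun p => p.1)).Nodup) := hd
  by_cases hc : d.contains (x.1, x.2.1) = true
  · -- key already present: flat step replaces a value in place
    obtain ⟨v0, hv0⟩ : ∃ v0, d.get? (x.1, x.2.1) = some v0 := by
      rw [PySem.Dict.contains_eq_isSome_get?] at hc
      exact Option.isSome_iff_exists.mp hc
    have hmem : ((x.1, x.2.1), v0) ∈ d.items := PySem.Dict.mem_items_of_get?_eq_some _ hv0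
    have hgetD : d.getD (x.1, x.2.1) 0 = v0 := PySem.Dict.getD_of_get?_eq_some _ _ hv0
    rw [show css_flat_step d x
        = d.insert (x.1, x.2.1) (d.getD (x.1, x.2.1) 0 + x.2.2) from by
      unfold css_flat_step; simp [hc]]
    rw [PySem.Dict.items_insert_of_contains _ _ hc]
    have hgpres : ∀ p : (String × String) × Int,
        ((fun p => if (p.1 == (x.1, x.2.1)) = true then ((x.1, x.2.1), d.getD (x.1, x.2.1) 0 + x.2.2) else p) p).1 = p.1 := by
      intro p
      by_cases hpk : (p.1 == (x.1, x.2.1)) = true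
      · simp [hpk]; exact (beq_iff_eq.mp hpk).symm
      · simp [hpk]
    have hkeys' : ((d.items.map (fun p => if (p.1 == (x.1, x.2.1)) = true then ((x.1, x.2.1), d.getD (x.1, x.2.1) 0 + x.2.2) else p)).map (fun p => p.1))
        = d.items.map (fun p => p.1) := by
      rw [List.map_map]
      exact List.map_congr_left (fun p _ => hgpres p)
    rw [charD_char _ (by rw [hkeys']; exact hdL), charD_char _ hdL]
    have hr1 : x.1 ∈ d.items.map (fun p => p.1.1) :=
      List.mem_map.mpr ⟨((x.1, x.2.1), v0), hmem, rfl⟩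
    have hks : (x.1, x.2.1) ∈ d.items.map (fun p => p.1) :=
      List.mem_map.mpr ⟨((x.1, x.2.1), v0), hmem, rfl⟩
    unfold calc_stat_sum_step
    rw [charD_contains]
    simp only [hr1, decide_true, if_true]
    rw [charD_getD _ _ hr1, inner_contains]
    simp only [hks, decide_true, if_true]
    have hinnerD : (PySem.Dict.mk ((d.items.filter (fun p => p.1.1 == x.1)).map (fun p => (p.1.2, p.2)))).getD x.2.1 0 = v0 := by
      apply PySem.Dict.getD_of_mem_items
      · exact List.mem_map.mpr ⟨((x.1, x.2.1), v0), List.mem_filter.mpr ⟨hmem, by simp⟩, rfl⟩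
      · exact inner_keys_nodup _ hdL x.1
    rw [hinnerD]
    apply PySem.Dict.ext
    rw [PySem.Dict.items_insert_of_contains _ _ (by rw [charD_contains]; simpa using hr1)]
    have hmap11 : (d.items.map (fun p => if (p.1 == (x.1, x.2.1)) = true then ((x.1, x.2.1), d.getD (x.1, x.2.1) 0 + x.2.2) else p)).map (fun p => p.1.1)
        = d.items.map (fun p => p.1.1) := by
      rw [List.map_map]
      exact List.map_congr_left (fun p _ => congrArg Prod.fst (hgpres p))
    simp only [charD, List.map_map, hmap11]
    apply List.map_congr_left
    intro r' hr'
    have hfilters : ∀ (q : ((String × String) × Int) → Bool), (∀ p, q p = (p.1.1 == r')) →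
        ((d.items.map (fun p => if (p.1 == (x.1, x.2.1)) = true then ((x.1, x.2.1), d.getD (x.1, x.2.1) 0 + x.2.2) else p)).filter (fun p => p.1.1 == r'))
        = (d.items.filter (fun p => p.1.1 == r')).map (fun p => if (p.1 == (x.1, x.2.1)) = true then ((x.1, x.2.1), d.getD (x.1, x.2.1) 0 + x.2.2) else p) := by
      intro _ _
      rw [List.filter_map]
      congr 1
      apply List.filter_congr
      intro p _
      have h5 : (if (p.1 == (x.1, x.2.1)) = true then ((x.1, x.2.1), d.getD (x.1, x.2.1) 0 + x.2.2) else p).1.1 = p.1.1 :=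
        congrArg Prod.fst (hgpres p)
      simp only [Function.comp_def, h5]
    have hfe := hfilters _ (fun _ => rfl)
    by_cases hrr : r' = x.1
    · subst hrr
      simp only [Function.comp_def, beq_self_eq_true, if_true]
      refine congrArg (fun dd => (x.1, dd)) (PySem.Dict.ext ?_)
      rw [PySem.Dict.items_insert_of_contains _ _ (by rw [inner_contains]; simpa using hks)]
      rw [hfe]
      simp only [List.map_map]
      apply List.map_congr_left
      intro p hp
      have hp11 : p.1.1 = x.1 := by
        simp only [List.mem_filter, beq_iff_eq] at hp
        exact hp.2
      simp only [Function.comp_def]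
      by_cases hpk : p.1 = (x.1, x.2.1)
      · have h12 : p.1.2 = x.2.1 := by rw [hpk]
        simp [hpk, hgetD]
      · have h12 : ¬ (p.1.2 = x.2.1) := by
          intro he
          exact hpk (Prod.ext hp11 he)
        simp [hpk, h12]
    · have hne2 : (r' == x.1) = false := beq_eq_false_iff_ne.mpr hrr
      simp only [Function.comp_def, hne2, Bool.false_eq_true, if_false]
      rw [hfe]
      refine congrArg (fun ll => (r', PySem.Dict.mk ll)) ?_
      simp only [List.map_map]
      apply List.map_congr_left
      intro p hp
      have hp11 : p.1.1 = r' := by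
        simp only [List.mem_filter, beq_iff_eq] at hp
        exact hp.2
      have hpk : ¬ (p.1 = (x.1, x.2.1)) := by
        intro he
        exact hrr (by rw [← hp11, he])
      simp [hpk]
  · -- fresh key: flat step appends, and one more nest step equals A's step
    have hcf : d.contains (x.1, x.2.1) = false := by
      simpa using hc
    have hks : (x.1, x.2.1) ∉ d.items.map (fun p => p.1) := by
      intro hm
      rw [show d.contains (x.1, x.2.1) = d.items.any (fun p => p.1 == (x.1, x.2.1)) from rfl] at hcf
      rw [List.any_eq_false] at hcf
      obtain ⟨p, hp, hp1⟩ := List.mem_map.mp hm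
      exact hcf p hp (by simp [hp1])
    rw [show css_flat_step d x = d.insert (x.1, x.2.1) x.2.2 from by
      unfold css_flat_step; simp [hcf]]
    rw [PySem.Dict.items_insert_of_not_contains _ _ hcf]
    unfold nestOf
    rw [List.foldl_append]
    simp only [List.foldl_cons, List.foldl_nil]
    rw [show List.foldl css_nest_step PySem.Dict.empty d.items = nestOf d.items from rfl]
    rw [charD_char _ hdL]
    unfold css_nest_step calc_stat_sum_step
    by_cases hr : x.1 ∈ d.items.map (fun p => p.1.1)
    · rw [show ((x.1, x.2.1), x.2.2).1.1 = x.1 from rfl, charD_contains]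
      simp only [hr, decide_true, if_true]
      rw [charD_getD _ _ hr, inner_contains]
      simp only [hks, decide_false, Bool.false_eq_true, if_false]
    · rw [show ((x.1, x.2.1), x.2.2).1.1 = x.1 from rfl, charD_contains]
      simp only [hr, decide_false, Bool.false_eq_true, if_false]
      rw [PySem.Dict.getD_insert_self, PySem.Dict.insert_insert_self]
      rfl

theorem flat_nodup (l : List (String × String × Int)) (d : PySem.Dict (String × String) Int)
    (hd : d.keys.Nodup) : (l.foldl css_flat_step d).keys.Nodup := by
  induction l generalizing d with
  | nil => exact hd
  | cons x l ih =>
      apply ih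
      show (if d.contains (x.1, x.2.1) = true then d.insert (x.1, x.2.1) (d.getD (x.1, x.2.1) 0 + x.2.2) else d.insert (x.1, x.2.1) x.2.2).keys.Nodup
      split <;> exact PySem.Dict.nodup_keys_insert _ _ _ hd

theorem main_eq (l : List (String × String × Int)) : calc_stat_sum l = calc_stat_sum_alt l := by
  have h : ∀ (l : List (String × String × Int)),
      l.foldl calc_stat_sum_step PySem.Dict.empty
        = nestOf (l.foldl css_flat_step PySem.Dict.empty).items := by
    intro l
    induction l using List.reverseRecOn with
    | nil => rfl
    | append_singleton l x ih =>
        rw [List.foldl_append, List.foldl_append]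
        simp only [List.foldl_cons, List.foldl_nil]
        rw [comm_step _ (flat_nodup l PySem.Dict.empty (by simp)) x, ih]
  simp only [calc_stat_sum, calc_stat_sum_alt, nestOf, h l]

-- ===== VERDICT (by name: the statement is the Claim_ definition above) =====
theorem calc_stat_sum_spec : Claim_equal_calc_stat_sum := by
  intro l _
  show calc_stat_sum l = calc_stat_sum_alt l
  exact main_eq l
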